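-- pv_equiv track=rewrite | github.com/iafisher/guatemalawi | guatemalawi.py | build_name
-- ===== SOURCE A (Python) =====
-- from typing import List, Iterator
--
-- def combine(c1: str, c2: str, threshold=2) -> str:
--     c1_lower = c1.lower()
--     c2_lower = c2.lower()
--     for i in range(threshold, min(len(c1), len(c2))):
--         if c1_lower[-i:] == c2_lower[:i]:
--             return c1 + c2[i:]
--     return ''
--
-- def build_name(so_far: str, names: List[str], overlap: int,
--                min_combos: int, min_length: int, combos=0) -> Iterator[str]:
--     for i, name in enumerate(names):
--         if name == so_far:
--             continue
--         if not so_far: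
--             combined = name
--         else:
--             combined = combine(so_far, name, overlap)
--         if combined:
--             new_names = names[:i] + names[i+1:]
--             yield from build_name(combined, new_names, overlap, min_combos,
--                                   min_length, combos + 1)
--     if combos >= min_combos and len(so_far) >= min_length:
--         yield so_far
-- ===== SOURCE B (Python) =====
-- from typing import List, Iterator
--
--
-- def combine(c1: str, c2: str, threshold=2) -> str:
--     c1_lower = c1.lower()
--     c2_lower = c2.lower()
--     for i in range(threshold, min(len(c1), len(c2))):
--         if c1_lower[-i:] == c2_lower[:i]:
--             return c1 + c2[i:]
--     return ''
--
--
-- def build_name(so_far: str, names: List[str], overlap: int,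
--                min_combos: int, min_length: int, combos=0) -> Iterator[str]:
--     # Iterative DFS with an explicit LIFO stack instead of recursive generator
--     # delegation.  A "work" frame expands a node; an "emit" frame, pushed below a
--     # node's children, yields that node's string after all its children (post-order).
--     stack = [("work", so_far, names, combos)]
--     while stack:
--         kind, s, ns, c = stack.pop()
--         if kind == "emit":
--             if c >= min_combos and len(s) >= min_length:
--                 yield s
--             continue
--         stack.append(("emit", s, None, c))
--         for i in range(len(ns) - 1, -1, -1):  # reversed so children pop left-to-right
--             name = ns[i]
--             if name == s:
--                 continue
--             combined = name if not s else combine(s, name, overlap)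
--             if combined:
--                 stack.append(("work", combined, ns[:i] + ns[i + 1:], c + 1))
-- ===== Notes on version B (the rewrite author's own statement) =====
-- stated objective: alternative
-- what changed: Replaced the recursive generator (yield-from DFS) by an iterative loop over an explicit LIFO stack of work/emit frames that reproduces the same post-order output, reusing combine unchanged.
import Mathlib
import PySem

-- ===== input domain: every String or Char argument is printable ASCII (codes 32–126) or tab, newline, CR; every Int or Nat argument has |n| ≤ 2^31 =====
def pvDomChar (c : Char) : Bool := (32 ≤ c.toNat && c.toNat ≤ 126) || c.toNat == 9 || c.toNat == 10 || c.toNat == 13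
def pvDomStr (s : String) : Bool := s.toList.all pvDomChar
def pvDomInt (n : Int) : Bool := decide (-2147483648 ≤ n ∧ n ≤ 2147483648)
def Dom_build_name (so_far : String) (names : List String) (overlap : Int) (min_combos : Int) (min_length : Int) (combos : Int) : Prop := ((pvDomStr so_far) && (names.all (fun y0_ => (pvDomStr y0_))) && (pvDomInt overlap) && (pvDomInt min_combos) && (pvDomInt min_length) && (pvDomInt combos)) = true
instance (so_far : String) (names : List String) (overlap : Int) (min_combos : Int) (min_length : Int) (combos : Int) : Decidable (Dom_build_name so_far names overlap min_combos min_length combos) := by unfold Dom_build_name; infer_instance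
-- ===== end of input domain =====

-- B replaces A's recursive generator by an iterative DFS over an explicit LIFO stack of
-- work/emit frames (same post-order output); alternative decomposition, no speed claim.

-- ===== PORT A =====
-- helper combine: the for-loop over range(threshold, min(len(c1), len(c2))) as a
-- recursion over the materialised range; shared by both ports (B reuses combine unchanged).
def combineLoop (c1 c2 c1l c2l : String) : List Int → String
  | [] => ""
  | i :: rest =>
    if PySem.Str.slice c1l (some (-i)) none = PySem.Str.slice c2l none (some i) then
      -- c1 + c2[i:], appended on the character-list side
      String.ofList (c1.toList ++ (PySem.Str.slice c2 (some i) none).toList)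
    else combineLoop c1 c2 c1l c2l rest

def combine (c1 c2 : String) (threshold : Int) : String :=
  combineLoop c1 c2 (PySem.Str.lower c1) (PySem.Str.lower c2)
    (PySem.List.pyRange threshold (min (PySem.Str.len c1) (PySem.Str.len c2)) 1)

-- names[:i] + names[i+1:] (i comes from enumerate, so 0 ≤ i < len names)
def dropAt (names : List String) (i : Int) : List String :=
  PySem.List.slice names none (some i) ++ PySem.List.slice names (some (i + 1)) none

-- A's recursion; fuel is ONLY a structural totality guard (the recursion removes one name
-- per level, so depth ≤ names.length and the fuel names.length + 1 given below never runs
-- out — proved in bnGo_congr/build_name_eq below); the body is A's for-loop plus final yield.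
def bnGo (overlap min_combos min_length : Int) : Nat → String → List String → Int → List String
  | 0, _, _, _ => []
  | fuel + 1, so_far, names, combos =>
    ((PySem.List.enumerate names).foldl (fun acc p =>
        if p.2 = so_far then acc
        else
          let combined := if so_far = "" then p.2 else combine so_far p.2 overlap
          if combined = "" then acc
          else acc ++ bnGo overlap min_combos min_length fuel combined (dropAt names p.1) (combos + 1))
      [])
    ++ (if min_combos ≤ combos ∧ min_length ≤ PySem.Str.len so_far then [so_far] else [])

def build_name (so_far : String) (names : List String) (overlap : Int) (min_combos : Int)
    (min_length : Int) (combos : Int) : List String :=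
  bnGo overlap min_combos min_length (names.length + 1) so_far names combos

-- ===== PORT B =====
-- a stack frame of B: expand a node (work), or yield its string after its children (emit)
inductive BFrame where
  | work : String → List String → Int → BFrame
  | emit : String → Int → BFrame

-- the child frames pushed for one work frame; in Python B they are pushed in REVERSED
-- index order onto the LIFO stack, so on the (head = top) stack list they sit in
-- increasing index order, exactly this list.
def mkChildren (s : String) (ns : List String) (overlap c : Int) : List BFrame :=
  (PySem.List.enumerate ns).filterMap (fun p =>
    if p.2 = s then none
    else
      let combined := if s = "" then p.2 else combine s p.2 overlap
      if combined = "" then none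
      else some (.work combined (dropAt ns p.1) (c + 1)))

-- B's while loop: pop the top frame, either emit or expand; fuel is ONLY a structural
-- totality guard (one unit per pop; the weight bound (names.length + 2)! given below is
-- proved sufficient in runGo_den, so the 0-fuel branch is never reached).
def runGo (overlap min_combos min_length : Int) : Nat → List BFrame → List String
  | _, [] => []
  | 0, _ :: _ => []
  | fuel + 1, .emit s c :: rest =>
    (if min_combos ≤ c ∧ min_length ≤ PySem.Str.len s then [s] else [])
      ++ runGo overlap min_combos min_length fuel rest
  | fuel + 1, .work s ns c :: rest =>
    runGo overlap min_combos min_length fuel (mkChildren s ns overlap c ++ BFrame.emit s c :: rest)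

def build_name_alt (so_far : String) (names : List String) (overlap : Int) (min_combos : Int)
    (min_length : Int) (combos : Int) : List String :=
  runGo overlap min_combos min_length ((names.length + 2).factorial)
    [BFrame.work so_far names combos]

-- ===== PRECONDITION & SPEC =====
def Spec_build_name (so_far : String) (names : List String) (overlap : Int) (min_combos : Int) (min_length : Int) (combos : Int) (out : List String) : Prop := out = build_name_alt so_far names overlap min_combos min_length combos
instance (so_far : String) (names : List String) (overlap : Int) (min_combos : Int) (min_length : Int) (combos : Int) (out : List String) : Decidable (Spec_build_name so_far names overlap min_combos min_length combos out) := by unfold Spec_build_name; infer_instance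

-- ===== CLAIM (what is proved, stated in full; the proofs are below) =====
def Claim_equal_build_name : Prop := ∀ (so_far : String) (names : List String) (overlap : Int) (min_combos : Int) (min_length : Int) (combos : Int), Dom_build_name so_far names overlap min_combos min_length combos → Spec_build_name so_far names overlap min_combos min_length combos (build_name so_far names overlap min_combos min_length combos)

-- ===== LEMMAS AND PROOFS =====

theorem dropAt_length_lt (names : List String) (i : Int) (name : String)
    (h : (i, name) ∈ PySem.List.enumerate names) : (dropAt names i).length < names.length := by
  obtain ⟨k, hk, hp⟩ := (PySem.List.mem_enumerate_iff names 0 (i, name)).1 h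
  have hi : i = (k : Int) := by
    have := congrArg Prod.fst hp; simpa using this
  subst hi
  have h1 : ((k : Int) + 1) = ((k + 1 : Nat) : Int) := by push_cast; ring
  rw [dropAt, h1, PySem.List.slice_to_natCast, PySem.List.slice_from_natCast]
  simp [List.length_take, List.length_drop]
  omega

-- fuel irrelevance for A's port: any fuel above the recursion depth gives the same value
theorem bnGo_congr (overlap mc ml : Int) :
    ∀ (fuel₁ fuel₂ : Nat) (so_far : String) (names : List String) (combos : Int),
      names.length < fuel₁ → names.length < fuel₂ →
      bnGo overlap mc ml fuel₁ so_far names combos = bnGo overlap mc ml fuel₂ so_far names combos := by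
  intro fuel₁
  induction fuel₁ with
  | zero => intro fuel₂ so_far names combos h1 _; omega
  | succ f₁ ih =>
    intro fuel₂ so_far names combos h1 h2
    cases fuel₂ with
    | zero => omega
    | succ f₂ =>
      simp only [bnGo]
      congr 1
      apply PySem.List.foldl_congr_mem
      intro acc p hp
      by_cases hA : p.2 = so_far
      · simp [hA]
      · by_cases hB : (if so_far = "" then p.2 else combine so_far p.2 overlap) = ""
        · simp [hA, hB]
        · have hlt : (dropAt names p.1).length < names.length :=
            dropAt_length_lt names p.1 p.2 hp
          simp only [hA, if_false, hB]
          rw [ih f₂ _ _ _ (by omega) (by omega)]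

-- what A yields for one (i, name) pair of the loop
def childOut (so_far : String) (names : List String) (overlap min_combos min_length c : Int)
    (p : Int × String) : List String :=
  if p.2 = so_far then []
  else
    let combined := if so_far = "" then p.2 else combine so_far p.2 overlap
    if combined = "" then []
    else build_name combined (dropAt names p.1) overlap min_combos min_length (c + 1)

theorem build_name_eq (s : String) (ns : List String) (overlap mc ml c : Int) :
    build_name s ns overlap mc ml c =
      ((PySem.List.enumerate ns).map (childOut s ns overlap mc ml c)).flatten
        ++ (if mc ≤ c ∧ ml ≤ PySem.Str.len s then [s] else []) := by
  rw [build_name]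
  simp only [bnGo]
  congr 1
  have hstep : ∀ (acc : List String) (p : Int × String), p ∈ PySem.List.enumerate ns →
      (if p.2 = s then acc
       else
         let combined := if s = "" then p.2 else combine s p.2 overlap
         if combined = "" then acc
         else acc ++ bnGo overlap mc ml ns.length combined (dropAt ns p.1) (c + 1))
      = acc ++ childOut s ns overlap mc ml c p := by
    intro acc p hp
    by_cases hA : p.2 = s
    · simp [hA, childOut]
    · by_cases hB : (if s = "" then p.2 else combine s p.2 overlap) = ""
      · simp [hA, hB, childOut]
      · have hlt : (dropAt ns p.1).length < ns.length := dropAt_length_lt ns p.1 p.2 hp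
        simp only [hA, if_false, hB, childOut, build_name]
        rw [bnGo_congr overlap mc ml ns.length ((dropAt ns p.1).length + 1) _ _ _
              (by omega) (by omega)]
  calc (PySem.List.enumerate ns).foldl (fun acc p =>
          if p.2 = s then acc
          else
            let combined := if s = "" then p.2 else combine s p.2 overlap
            if combined = "" then acc
            else acc ++ bnGo overlap mc ml ns.length combined (dropAt ns p.1) (c + 1)) []
      = (PySem.List.enumerate ns).foldl (fun acc p => acc ++ childOut s ns overlap mc ml c p) [] := by
        exact PySem.List.foldl_congr_mem _ _ _ _ (fun acc p hp => hstep acc p hp)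
    _ = ((PySem.List.enumerate ns).map (childOut s ns overlap mc ml c)).flatten := by
        rw [PySem.List.foldl_append_eq_flatMap]
        simp [List.flatMap_def]

-- the value of one frame of B, in terms of A's port
def den (overlap min_combos min_length : Int) : BFrame → List String
  | .work s ns c => build_name s ns overlap min_combos min_length c
  | .emit s c => if min_combos ≤ c ∧ min_length ≤ PySem.Str.len s then [s] else []

-- termination weight of a frame (proof-side only: it bounds how many pops B still makes)
def wt : BFrame → Nat
  | .work _ ns _ => (ns.length + 2).factorial
  | .emit _ _ => 1

theorem wt_pos (f : BFrame) : 1 ≤ wt f := by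
  cases f
  · exact Nat.one_le_iff_ne_zero.2 (Nat.factorial_ne_zero _)
  · exact le_refl 1

theorem mkChildren_wt_sum (s : String) (ns : List String) (overlap c : Int) :
    ((mkChildren s ns overlap c).map wt).sum + 1 < (ns.length + 2).factorial := by
  have hwt : ∀ f ∈ mkChildren s ns overlap c, wt f ≤ (ns.length + 1).factorial := by
    intro f hf
    obtain ⟨p, hp, hfp⟩ := List.mem_filterMap.1 hf
    have hlen : (dropAt ns p.1).length < ns.length := by
      have : p = (p.1, p.2) := rfl
      exact dropAt_length_lt ns p.1 p.2 (by rw [← this]; exact hp)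
    by_cases h1 : p.2 = s
    · simp [h1] at hfp
    · by_cases h2 : (if s = "" then p.2 else combine s p.2 overlap) = ""
      · simp [h1, h2] at hfp
      · simp only [h1, if_false, h2] at hfp
        injection hfp with hfp
        rw [← hfp]
        simp only [wt]
        exact Nat.factorial_le (by omega)
  have hlenc : (mkChildren s ns overlap c).length ≤ ns.length := by
    calc (mkChildren s ns overlap c).length
        ≤ (PySem.List.enumerate ns).length := List.length_filterMap_le _ _
      _ = ns.length := by simp [PySem.List.length_enumerate]
  have hsum : ((mkChildren s ns overlap c).map wt).sum
      ≤ (mkChildren s ns overlap c).length * (ns.length + 1).factorial := by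
    have := List.sum_le_card_nsmul ((mkChildren s ns overlap c).map wt)
      ((ns.length + 1).factorial) (by intro x hx; obtain ⟨f, hf, rfl⟩ := List.mem_map.1 hx; exact hwt f hf)
    simpa [smul_eq_mul] using this
  have hfac : (ns.length + 2).factorial = (ns.length + 2) * (ns.length + 1).factorial := rfl
  have hpos : 1 ≤ (ns.length + 1).factorial := Nat.one_le_iff_ne_zero.2 (Nat.factorial_ne_zero _)
  calc ((mkChildren s ns overlap c).map wt).sum + 1
      ≤ ns.length * (ns.length + 1).factorial + 1 := by
        have := hsum.trans (Nat.mul_le_mul_right _ hlenc); omega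
    _ < (ns.length + 2) * (ns.length + 1).factorial := by nlinarith
    _ = (ns.length + 2).factorial := hfac.symm

theorem den_mkChildren_aux (s : String) (ns : List String) (overlap mc ml c : Int)
    (l : List (Int × String)) :
    ((l.filterMap (fun p =>
        if p.2 = s then none
        else
          let combined := if s = "" then p.2 else combine s p.2 overlap
          if combined = "" then none
          else some (BFrame.work combined (dropAt ns p.1) (c + 1)))).map
      (den overlap mc ml)).flatten
      = (l.map (childOut s ns overlap mc ml c)).flatten := by
  induction l with
  | nil => simp
  | cons p rest ih =>
    simp only [List.filterMap_cons]
    by_cases h1 : p.2 = s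
    · simp [h1, childOut, ih]
    · simp only [h1, if_false]
      by_cases h2 : (if s = "" then p.2 else combine s p.2 overlap) = ""
      · simp [h1, h2, childOut, ih]
      · simp [h1, h2, childOut, ih, den]

theorem den_mkChildren (s : String) (ns : List String) (overlap mc ml c : Int) :
    ((mkChildren s ns overlap c).map (den overlap mc ml)).flatten
      = ((PySem.List.enumerate ns).map (childOut s ns overlap mc ml c)).flatten := by
  rw [mkChildren]; exact den_mkChildren_aux s ns overlap mc ml c _

-- the main invariant: with enough fuel, B's stack loop returns the concatenation of the
-- denotations of its frames
theorem runGo_den (overlap mc ml : Int) :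
    ∀ (fuel : Nat) (stack : List BFrame), (stack.map wt).sum ≤ fuel →
      runGo overlap mc ml fuel stack = (stack.map (den overlap mc ml)).flatten := by
  intro fuel
  induction fuel with
  | zero =>
    intro stack h
    cases stack with
    | nil => simp [runGo]
    | cons f rest =>
      exfalso
      have := wt_pos f
      simp only [List.map_cons, List.sum_cons] at h
      omega
  | succ fuel ih =>
    intro stack h
    cases stack with
    | nil => simp [runGo]
    | cons f rest =>
      cases f with
      | emit s c =>
        have hr : (rest.map wt).sum ≤ fuel := by
          simp only [List.map_cons, List.sum_cons, wt] at h; omega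
        simp only [runGo, ih rest hr, List.map_cons, List.flatten_cons, den]
      | work s ns c =>
        have hm := mkChildren_wt_sum s ns overlap c
        have hr : (((mkChildren s ns overlap c ++ BFrame.emit s c :: rest)).map wt).sum ≤ fuel := by
          simp only [List.map_append, List.sum_append, List.map_cons, List.sum_cons, wt]
          simp only [List.map_cons, List.sum_cons, wt] at h
          omega
        rw [runGo, ih _ hr]
        simp only [List.map_append, List.flatten_append, List.map_cons, List.flatten_cons]
        rw [den_mkChildren]
        simp [den, build_name_eq, List.append_assoc]

-- ===== VERDICT (by name: the statement is the Claim_ definition above) =====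
theorem build_name_spec : Claim_equal_build_name := by
  intro so_far names overlap mc ml c _
  unfold Spec_build_name build_name_alt
  rw [runGo_den overlap mc ml _ _ (by simp [wt])]
  simp [den]
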